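-- pv_equiv track=rewrite | github.com/fob413/airtech | app/utils/tools.py | generate_seat_numbers
-- ===== SOURCE A (Python) =====
-- def generate_seat_numbers(no_of_seats):
--     seat_letters = ['A', 'B', 'C', 'D', 'E', 'F', 'G']
--     seat_index = 0
--     seat_list = []
--
--     for num in range(no_of_seats):
--         seat_list.append(seat_letters[seat_index] + str(num + 1))
--
--         if seat_index is (len(seat_letters) - 1): seat_index = 0
--         else: seat_index += 1
--
--     return seat_list
-- ===== SOURCE B (Python) =====
-- def generate_seat_numbers(no_of_seats):
--     letters = "ABCDEFG"
--     seat_list = []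
--     row_start = 0
--     while row_start < no_of_seats:
--         row = letters[: no_of_seats - row_start]
--         for offset, letter in enumerate(row):
--             seat_list.append(letter + str(row_start + offset + 1))
--         row_start += 7
--     return seat_list
-- ===== Notes on version B (the rewrite author's own statement) =====
-- stated objective: alternative
-- what changed: Replaces A's single per-seat loop with a threaded wrap-around letter counter by a row-wise two-level traversal: an outer while loop steps through rows of seven letters, slices the letter string to the row's actual width, and an inner enumerate loop pairs each letter with its absolute seat number.
import Mathlib
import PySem

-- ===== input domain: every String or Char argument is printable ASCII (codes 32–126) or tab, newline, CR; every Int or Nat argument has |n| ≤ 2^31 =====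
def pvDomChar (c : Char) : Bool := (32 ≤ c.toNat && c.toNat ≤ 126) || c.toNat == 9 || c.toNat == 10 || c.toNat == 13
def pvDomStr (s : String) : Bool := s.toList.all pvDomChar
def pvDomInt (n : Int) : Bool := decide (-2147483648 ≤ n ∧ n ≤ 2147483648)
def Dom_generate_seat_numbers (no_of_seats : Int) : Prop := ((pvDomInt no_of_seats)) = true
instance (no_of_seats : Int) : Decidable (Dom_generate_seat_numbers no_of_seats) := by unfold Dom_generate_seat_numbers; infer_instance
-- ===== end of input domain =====

-- B replaces A's single per-seat loop with its threaded wrap-around letter counter by a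
-- row-wise two-level traversal (outer while over rows of seven, string slice for the row,
-- inner enumerate over the row's letters); objective: alternative decomposition.

-- ===== PORT A =====
def pvLetters : List String := ["A", "B", "C", "D", "E", "F", "G"]

-- A's loop threads (seat_index, seat_list); indexing is in range by the loop's invariant,
-- ported with pyGetD (default never used). 'is' on the small ints 0..6 behaves as '=='.
def generate_seat_numbers (no_of_seats : Int) : List String :=
  ((PySem.List.pyRange 0 no_of_seats 1).foldl
    (fun (st : Int × List String) num =>
      let lst := st.2 ++ [PySem.List.pyGetD pvLetters st.1 "" ++ PySem.Int.toStr (num + 1)]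
      let idx := if st.1 = (PySem.List.len pvLetters) - 1 then 0 else st.1 + 1
      (idx, lst))
    (0, [])).2

-- ===== PORT B =====
def pvLettersStr : String := "ABCDEFG"

-- B's outer while loop: one call per row of seven seats; the row's letters are a string
-- slice, the inner for loop is a fold over enumerate of the row's characters.
def pvAltLoop (n : Int) (rowStart : Int) (acc : List String) : List String :=
  if h : rowStart < n then
    let row := PySem.Str.slice pvLettersStr none (some (n - rowStart))
    let acc' := (PySem.List.enumerate row.toList 0).foldl
      (fun a p => a ++ [String.ofList [p.2] ++ PySem.Int.toStr (rowStart + p.1 + 1)]) acc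
    pvAltLoop n (rowStart + 7) acc'
  else acc
termination_by (n - rowStart).toNat
decreasing_by omega

def generate_seat_numbers_alt (no_of_seats : Int) : List String :=
  pvAltLoop no_of_seats 0 []

-- ===== PRECONDITION & SPEC =====
def Spec_generate_seat_numbers (no_of_seats : Int) (out : List String) : Prop := out = generate_seat_numbers_alt no_of_seats
instance (no_of_seats : Int) (out : List String) : Decidable (Spec_generate_seat_numbers no_of_seats out) := by unfold Spec_generate_seat_numbers; infer_instance

-- ===== CLAIM (what is proved, stated in full; the proofs are below) =====
def Claim_equal_generate_seat_numbers : Prop := ∀ (no_of_seats : Int), Dom_generate_seat_numbers no_of_seats → Spec_generate_seat_numbers no_of_seats (generate_seat_numbers no_of_seats)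

-- ===== LEMMAS AND PROOFS =====

-- Canonical label of seat j (0-based): letter j % 7, number j + 1.
def pvSpecF (j : Nat) : String :=
  PySem.List.pyGetD pvLetters ((j % 7 : Nat) : Int) "" ++ PySem.Int.toStr ((j : Int) + 1)

-- A's fold: after seats 0..k-1 the state is (k % 7, canonical list).
theorem pv_fold_inv (k : Nat) :
    ((List.range k).map (fun j : Nat => (0 : Int) + (j : Int))).foldl
      (fun (st : Int × List String) num =>
        let lst := st.2 ++ [PySem.List.pyGetD pvLetters st.1 "" ++ PySem.Int.toStr (num + 1)]
        let idx := if st.1 = (PySem.List.len pvLetters) - 1 then 0 else st.1 + 1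
        (idx, lst))
      (0, [])
    = (((k % 7 : Nat) : Int), (List.range k).map pvSpecF) := by
  induction k with
  | zero => simp
  | succ k ih =>
    rw [List.range_succ]
    simp only [List.map_append, List.foldl_append, ih, List.map_cons, List.map_nil,
      List.foldl_cons, List.foldl_nil]
    rw [Prod.mk.injEq]
    refine ⟨?_, ?_⟩
    · have hlen : PySem.List.len pvLetters = 7 := by decide
      rw [hlen]
      split_ifs with h <;> (push_cast at h ⊢; omega)
    · simp [pvSpecF]

-- appending fold = map
theorem pv_foldl_append_map {α : Type} (g : α → String) (l : List α) (acc : List String) :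
    l.foldl (fun a x => a ++ [g x]) acc = acc ++ l.map g := by
  induction l generalizing acc with
  | nil => simp
  | cons x xs ih => simp [ih]

-- B's outer loop computes the canonical suffix from any row start 7*q.
theorem pv_altLoop_eq (d : Nat) (n : Int) (q : Nat) (acc : List String)
    (hd : n.toNat - 7 * q ≤ d) :
    pvAltLoop n ((7 * q : Nat) : Int) acc
      = acc ++ (List.range' (7 * q) (n.toNat - 7 * q)).map pvSpecF := by
  induction d generalizing q acc with
  | zero =>
    have hnot : ¬ (((7 * q : Nat) : Int) < n) := by omega
    rw [pvAltLoop, dif_neg hnot]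
    have : n.toNat - 7 * q = 0 := by omega
    simp [this]
  | succ d ih =>
    by_cases hlt : ((7 * q : Nat) : Int) < n
    · rw [pvAltLoop, dif_pos hlt]
      have hn0 : 0 ≤ n := by omega
      set t : Nat := n.toNat - 7 * q with ht
      have htpos : 1 ≤ t := by omega
      have hrow : (PySem.Str.slice pvLettersStr none (some (n - ((7 * q : Nat) : Int)))).toList
          = pvLettersStr.toList.take t := by
        rw [PySem.Str.toList_slice, PySem.Chars.slice_eq_listSlice,
          PySem.List.slice_to _ (by omega)]
        congr 1
        omega
      simp only [hrow, pv_foldl_append_map]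
      have hm : (pvLettersStr.toList.take t).length = min t 7 := by
        simp [pvLettersStr]
      -- the row's labels are the canonical labels of seats 7q .. 7q + min t 7 - 1
      have hmap : (PySem.List.enumerate (pvLettersStr.toList.take t) 0).map
            (fun p => String.ofList [p.2] ++ PySem.Int.toStr (((7 * q : Nat) : Int) + p.1 + 1))
          = (List.range' (7 * q) (min t 7)).map pvSpecF := by
        apply List.ext_getElem
        · simp [PySem.List.length_enumerate, hm]
        · intro k h1 h2
          have hk7 : k < 7 := by
            simp [PySem.List.length_enumerate, hm] at h1; omega
          have hkt : k < t := by
            simp [PySem.List.length_enumerate, hm] at h1; omega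
          have hklen : k < (pvLettersStr.toList.take t).length := by omega
          simp only [List.getElem_map, PySem.List.getElem_enumerate, List.getElem_range']
          unfold pvSpecF
          have hmod : (7 * q + 1 * k) % 7 = k := by omega
          rw [hmod]
          congr 1
          · rw [List.getElem_take]
            interval_cases k <;> simp [pvLettersStr, pvLetters] <;> decide
          · congr 1
            push_cast
            ring
      rw [hmap]
      have hstep : ((7 * q : Nat) : Int) + 7 = ((7 * (q + 1) : Nat) : Int) := by push_cast; ring
      rw [hstep, ih (q + 1) _ (by omega)]
      rw [List.append_assoc]
      congr 1
      have hsplit : List.range' (7 * q) (n.toNat - 7 * q)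
          = List.range' (7 * q) (min t 7) ++ List.range' (7 * q + 1 * min t 7) (n.toNat - 7 * (q + 1)) := by
        have h1 : n.toNat - 7 * q = min t 7 + (n.toNat - 7 * (q + 1)) := by omega
        rw [h1, ← List.range'_append]
      rw [hsplit, List.map_append]
      congr 1
      by_cases h7 : 7 ≤ t
      · have hmin : min t 7 = 7 := by omega
        rw [hmin]
        congr 2
      · have h0 : n.toNat - 7 * (q + 1) = 0 := by omega
        simp [h0]
    · rw [pvAltLoop, dif_neg hlt]
      have : n.toNat - 7 * q = 0 := by omega
      simp [this]

-- ===== VERDICT (by name: the statement is the Claim_ definition above) =====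
theorem generate_seat_numbers_spec : Claim_equal_generate_seat_numbers := by
  intro n _
  unfold Spec_generate_seat_numbers generate_seat_numbers generate_seat_numbers_alt
  rw [PySem.List.pyRange_one]
  have h0 : (0 : Int) = ((7 * 0 : Nat) : Int) := by norm_num
  rw [pv_fold_inv, h0, pv_altLoop_eq (n.toNat) n 0 [] (by omega)]
  simp [List.range_eq_range']
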